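-- pv_equiv track=rewrite | github.com/silvermaking/Python-Algorithm | Baekjoon/1316.그룹단어체커(백준)(완).py | groupword
-- ===== SOURCE A (Python) =====
-- def groupword(lst):
--     ST =[lst[0]]  #[a]
--     if len(lst) == 1:
--         return 1
--     for s in lst:
--         if ST[-1] != s:
--             ST.append(s)
--
--         if s in ST[:-1]:
--             return 0
--     return 1
-- ===== SOURCE B (Python) =====
-- def groupword(lst):
--     # Consume the word run by run: strip the leading run of equal letters,
--     # then that letter must never occur in the remainder ahead.
--     s = lst
--     while s:
--         c = s[0]
--         i = 1
--         while i < len(s) and s[i] == c: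
--             i += 1
--         s = s[i:]
--         if c in s:
--             return 0
--     return 1
-- ===== Notes on version B (the rewrite author's own statement) =====
-- stated objective: alternative
-- what changed: B keeps no history at all: it consumes the word run by run, stripping each leading run of equal letters and testing whether that letter reappears in the remainder AHEAD, instead of A's growing run-compressed list with backward slice-membership tests per character.
import Mathlib
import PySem

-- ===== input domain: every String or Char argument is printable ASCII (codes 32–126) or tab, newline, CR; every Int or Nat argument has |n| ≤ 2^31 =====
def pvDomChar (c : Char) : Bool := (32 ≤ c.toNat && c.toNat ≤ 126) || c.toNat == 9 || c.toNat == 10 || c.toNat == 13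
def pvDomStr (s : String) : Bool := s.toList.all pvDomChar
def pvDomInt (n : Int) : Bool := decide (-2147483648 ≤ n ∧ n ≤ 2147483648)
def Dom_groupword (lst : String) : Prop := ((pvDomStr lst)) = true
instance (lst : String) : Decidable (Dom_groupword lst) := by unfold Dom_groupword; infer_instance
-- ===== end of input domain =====

-- B consumes the word run by run (strip the leading run, test its letter against the
-- remainder ahead), keeping no history, instead of A's growing run-compressed list with
-- backward membership tests (objective: alternative; no speed claim).

-- ===== PORT A =====
-- the for-loop of A: state is ST (the run-compressed list built so far)
def gwLoopA : List Char → List Char → Int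
  | [], _ => 1
  | s :: rest, ST =>
    let ST' := if ST.getLast? ≠ some s then ST ++ [s] else ST
    if s ∈ ST'.dropLast then 0 else gwLoopA rest ST'

def groupword (lst : String) : Int :=
  match lst.toList with
  | [] => 0  -- lst[0] raises IndexError here; excluded by Pre_groupword
  | c :: _ =>
    if PySem.Str.len lst = 1 then 1
    else gwLoopA lst.toList [c]

-- ===== PORT B =====
-- inner while of B: s = s[i:] drops the leading run of c (exact port of the index scan + slice)
def stripRunB (c : Char) : List Char → List Char
  | [] => []
  | x :: xs => if x = c then stripRunB c xs else x :: xs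

lemma stripRunB_length_le (c : Char) (l : List Char) : (stripRunB c l).length ≤ l.length := by
  induction l with
  | nil => simp [stripRunB]
  | cons x xs ih =>
    by_cases h : x = c
    · simp only [stripRunB, if_pos h, List.length_cons]; omega
    · simp [stripRunB, h]

-- outer while of B: state is the remaining suffix s
def gwRecB : List Char → Int
  | [] => 1
  | c :: xs =>
    let rest := stripRunB c xs
    if c ∈ rest then 0 else gwRecB rest
termination_by l => l.length
decreasing_by simpa using Nat.lt_succ_of_le (stripRunB_length_le c xs)

def groupword_alt (lst : String) : Int :=
  gwRecB lst.toList

-- ===== PRECONDITION & SPEC =====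
-- A raises IndexError on the empty string (lst[0]); nothing else raises.
def Pre_groupword (lst : String) : Prop := lst ≠ ""
instance (lst : String) : Decidable (Pre_groupword lst) := by unfold Pre_groupword; infer_instance
def pvWitness_groupword : String := "aab"

def Spec_groupword (lst : String) (out : Int) : Prop := out = groupword_alt lst
instance (lst : String) (out : Int) : Decidable (Spec_groupword lst out) := by unfold Spec_groupword; infer_instance

-- ===== CLAIM (what is proved, stated in full; the proofs are below) =====
def Claim_equal_groupword : Prop := ∀ (lst : String), Dom_groupword lst → Pre_groupword lst → Spec_groupword lst (groupword lst)

-- ===== LEMMAS AND PROOFS =====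

-- run-compression with a previous character p (the common yardstick both loops reduce to)
def cramC (p : Char) : List Char → List Char
  | [] => []
  | x :: xs => if x = p then cramC p xs else x :: cramC x xs

def dedupC : List Char → List Char
  | [] => []
  | c :: xs => c :: cramC c xs

lemma gwRecB_nil : gwRecB [] = 1 := by
  rw [gwRecB]

lemma gwRecB_cons (c : Char) (xs : List Char) :
    gwRecB (c :: xs) = if c ∈ stripRunB c xs then 0 else gwRecB (stripRunB c xs) := by
  rw [gwRecB]

lemma mem_stripRunB {a p : Char} (h : a ≠ p) (l : List Char) :
    a ∈ stripRunB p l ↔ a ∈ l := by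
  induction l with
  | nil => simp [stripRunB]
  | cons x xs ih =>
    by_cases hx : x = p
    · rw [show stripRunB p (x :: xs) = stripRunB p xs by simp [stripRunB, hx], ih]
      simp only [List.mem_cons]
      exact ⟨Or.inr, fun hc => hc.resolve_left (fun hax => h (hax.trans hx))⟩
    · simp [stripRunB, hx]

lemma mem_cramC (a p : Char) (l : List Char) :
    a ∈ cramC p l ↔ a ∈ stripRunB p l := by
  induction l generalizing p with
  | nil => simp [cramC, stripRunB]
  | cons x xs ih =>
    by_cases hx : x = p
    · simp only [cramC, stripRunB, if_pos hx]; exact ih p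
    · simp only [cramC, stripRunB, if_neg hx, List.mem_cons]
      by_cases ha : a = x
      · simp [ha]
      · have := (ih x).trans (mem_stripRunB ha xs)
        simp [ha, this]

lemma cramC_stripRunB (p : Char) (l : List Char) :
    cramC p l = cramC p (stripRunB p l) := by
  induction l with
  | nil => rfl
  | cons x xs ih =>
    by_cases hx : x = p
    · simp only [cramC, stripRunB, if_pos hx]; exact ih
    · simp [cramC, stripRunB, hx]

lemma stripRunB_ne_head (c : Char) (l : List Char) :
    ∀ x xs', stripRunB c l = x :: xs' → x ≠ c := by
  induction l with
  | nil => intro x xs' h; simp [stripRunB] at h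
  | cons y ys ih =>
    intro x xs' h
    by_cases hy : y = c
    · rw [stripRunB, if_pos hy] at h; exact ih x xs' h
    · rw [stripRunB, if_neg hy] at h
      rw [List.cons.injEq] at h
      exact h.1 ▸ hy

lemma getLast_not_mem_dropLast {ST : List Char} {s : Char}
    (nd : ST.Nodup) (h : ST.getLast? = some s) : s ∉ ST.dropLast := by
  have hne : ST ≠ [] := by rintro rfl; simp at h
  have hg : ST.getLast hne = s := by
    have := List.getLast?_eq_some_getLast (l := ST) hne
    rw [this, Option.some_inj] at h; exact h
  have hST : ST.dropLast ++ [s] = ST := by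
    rw [← hg]; exact List.dropLast_append_getLast hne
  intro hm
  rw [← hST, List.nodup_append] at nd
  exact nd.2.2 s hm s (List.mem_singleton.mpr rfl) rfl

-- A's loop computes: 1 iff ST followed by the run-compression of the rest is duplicate-free
lemma gwLoopA_eq (rest : List Char) : ∀ (ST : List Char) (p : Char), ST.Nodup →
    ST.getLast? = some p →
    gwLoopA rest ST = if (ST ++ cramC p rest).Nodup then 1 else 0 := by
  induction rest with
  | nil => intro ST p nd _; simp [gwLoopA, cramC, nd]
  | cons s rest ih =>
    intro ST p nd hlast
    by_cases hs : s = p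
    · subst hs
      have hnm : s ∉ ST.dropLast := getLast_not_mem_dropLast nd hlast
      simp only [gwLoopA, hlast, ne_eq, not_true_eq_false, if_false, if_neg hnm]
      rw [ih ST s nd hlast]
      simp [cramC]
    · have hlastne : ST.getLast? ≠ some s := by
        rw [hlast]; intro hc; exact hs (Option.some_inj.mp hc).symm
      have hdrop : (ST ++ [s]).dropLast = ST := by simp
      simp only [gwLoopA, if_pos hlastne, hdrop]
      by_cases hmem : s ∈ ST
      · rw [if_pos hmem, if_neg]
        simp only [cramC, if_neg hs, List.nodup_append]
        intro hc
        exact hc.2.2 s hmem s (List.mem_cons_self ..) rfl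
      · rw [if_neg hmem]
        have nd' : (ST ++ [s]).Nodup := by
          rw [List.nodup_append]
          exact ⟨nd, List.nodup_singleton s, fun a ha b hb hab => hmem (by rw [List.mem_singleton] at hb; rw [hab, hb] at ha; exact ha)⟩
        have hl' : (ST ++ [s]).getLast? = some s := by
          simp [List.getLast?_append]
        rw [ih (ST ++ [s]) s nd' hl']
        have : (ST ++ [s]) ++ cramC s rest = ST ++ cramC p (s :: rest) := by
          simp [cramC, if_neg hs, List.append_assoc]
        rw [this]

-- B computes the same yardstick
lemma gwRecB_eq : ∀ (n : Nat) (s : List Char), s.length ≤ n →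
    gwRecB s = if (dedupC s).Nodup then 1 else 0 := by
  intro n
  induction n with
  | zero =>
    intro s hs
    have : s = [] := List.length_eq_zero_iff.mp (Nat.le_zero.mp hs)
    subst this
    simp [gwRecB_nil, dedupC]
  | succ n ih =>
    intro s hs
    cases s with
    | nil => simp [gwRecB_nil, dedupC]
    | cons c xs =>
      rw [gwRecB_cons]
      have hcnm : c ∈ cramC c xs ↔ c ∈ stripRunB c xs := mem_cramC c c xs
      by_cases hmem : c ∈ stripRunB c xs
      · rw [if_pos hmem, if_neg]
        intro hnd
        rw [dedupC, List.nodup_cons] at hnd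
        exact hnd.1 (hcnm.mpr hmem)
      · rw [if_neg hmem]
        have hlen : (stripRunB c xs).length ≤ n := by
          have h1 := stripRunB_length_le c xs
          simp only [List.length_cons] at hs
          omega
        rw [ih _ hlen]
        cases hr : stripRunB c xs with
        | nil =>
          have hc0 : cramC c xs = [] := by rw [cramC_stripRunB, hr]; rfl
          simp [dedupC, hc0]
        | cons x xs' =>
          have hxc : x ≠ c := stripRunB_ne_head c xs x xs' hr
          have hc : cramC c xs = x :: cramC x xs' := by
            rw [cramC_stripRunB, hr]
            simp [cramC, hxc]
          have hcL : c ∉ x :: cramC x xs' := by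
            rw [← hc]
            intro h
            exact hmem (hcnm.mp h)
          rw [hr] at hmem
          simp only [dedupC, hc, List.nodup_cons]
          simp [hcL]

-- ===== VERDICT (by name: the statement is the Claim_ definition above) =====
theorem groupword_spec : Claim_equal_groupword := by
  intro lst _ hpre
  unfold Spec_groupword groupword groupword_alt
  have hne : lst.toList ≠ [] := by
    intro h; apply hpre; rw [← String.toList_inj, h]; rfl
  obtain ⟨c, xs, hlist⟩ : ∃ c xs, lst.toList = c :: xs := by
    cases h : lst.toList with
    | nil => exact absurd h hne
    | cons c xs => exact ⟨c, xs, rfl⟩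
  rw [hlist]
  dsimp only
  have hB : gwRecB (c :: xs) = if (c :: cramC c xs).Nodup then 1 else 0 := by
    rw [gwRecB_eq (c :: xs).length (c :: xs) le_rfl]; rfl
  rw [hB]
  by_cases hlen : PySem.Str.len lst = 1
  · have hxs : xs = [] := by
      have h1 : (lst.toList.length : Int) = 1 := by rw [← PySem.Str.len_eq]; exact hlen
      rw [hlist] at h1; simp at h1; omega
    subst hxs
    rw [if_pos hlen]
    simp [cramC]
  · rw [if_neg hlen]
    have hAstep : gwLoopA (c :: xs) [c] = gwLoopA xs [c] := by
      simp [gwLoopA]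
    rw [hAstep, gwLoopA_eq xs [c] c (List.nodup_singleton c) rfl]
    simp
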